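-- pv_equiv track=rewrite | github.com/Nawweh/Python-Coding-Y1 | scrabble letters.py | find_letter_value
-- ===== SOURCE A (Python) =====
-- def find_letter_value(entered_letter):
--     totPoint = 0
--     points = [["a", "e", "i", "o", "u", "l", "n", "r", "s", "t"],
--               ["d", "g"],
--               ["b", "c", "m", "p"],
--               ["f", "h", "v", "w", "y"],
--               "k",
--               ["j", "x"],
--               ["q", "z"]]
--
--     for y in range(len(points)):
--         for x in points[y]:
--             if x == entered_letter:
--                 match(y+1):
--                     case 1:
--                         totPoint = 1
--                         break
--                     case 2:
--                         totPoint = 2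
--                         break
--                     case 3:
--                         totPoint = 3
--                         break
--                     case 4:
--                         totPoint = 4
--                         break
--                     case 5:
--                         totPoint = 5
--                         break
--                     case 6:
--                         totPoint = 8
--                         break
--                     case 7:
--                         totPoint = 10
--                         break
--     return totPoint
-- ===== SOURCE B (Python) =====
-- SCRABBLE_VALUES = {"a": 1, "e": 1, "i": 1, "o": 1, "u": 1, "l": 1, "n": 1, "r": 1, "s": 1, "t": 1,
--                    "d": 2, "g": 2,
--                    "b": 3, "c": 3, "m": 3, "p": 3,
--                    "f": 4, "h": 4, "v": 4, "w": 4, "y": 4,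
--                    "k": 5,
--                    "j": 8, "x": 8,
--                    "q": 10, "z": 10}
--
-- def find_letter_value(entered_letter):
--     return SCRABBLE_VALUES.get(entered_letter, 0)
-- ===== Notes on version B (the rewrite author's own statement) =====
-- stated objective: simpler
-- what changed: Replaced the nested row/letter loops with a match statement on the row index by a single flat letter-to-value dict literal and one .get lookup with default 0.
import Mathlib
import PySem

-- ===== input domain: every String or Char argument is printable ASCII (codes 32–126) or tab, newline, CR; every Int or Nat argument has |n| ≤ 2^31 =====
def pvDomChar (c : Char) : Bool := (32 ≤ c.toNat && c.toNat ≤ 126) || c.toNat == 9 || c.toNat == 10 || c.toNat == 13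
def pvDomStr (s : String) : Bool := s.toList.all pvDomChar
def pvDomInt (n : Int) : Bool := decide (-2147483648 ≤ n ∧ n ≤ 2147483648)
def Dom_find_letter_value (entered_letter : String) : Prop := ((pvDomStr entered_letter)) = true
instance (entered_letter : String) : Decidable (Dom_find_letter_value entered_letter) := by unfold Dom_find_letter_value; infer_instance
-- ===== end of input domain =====

-- B replaces A's nested loops + match on the row index by one flat letter→value dict and a single .get lookup (simpler).

-- ===== PORT A =====
-- the rows of A's `points` list (the bare string "k" iterates as the single letter "k")
def pvPointsA : List (List String) :=
  [["a", "e", "i", "o", "u", "l", "n", "r", "s", "t"],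
   ["d", "g"],
   ["b", "c", "m", "p"],
   ["f", "h", "v", "w", "y"],
   ["k"],
   ["j", "x"],
   ["q", "z"]]

-- A's match(y+1) statement
def pvMatchA (y1 : Int) : Int :=
  if y1 = 1 then 1
  else if y1 = 2 then 2
  else if y1 = 3 then 3
  else if y1 = 4 then 4
  else if y1 = 5 then 5
  else if y1 = 6 then 8
  else if y1 = 7 then 10
  else 0

-- inner `for x in points[y]` loop: on a match set totPoint and break, else continue
def pvInnerA (xs : List String) (entered_letter : String) (y : Int) (tot : Int) : Int :=
  match xs with
  | [] => tot
  | x :: rest =>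
    if x == entered_letter then pvMatchA (y + 1)
    else pvInnerA rest entered_letter y tot

def find_letter_value (entered_letter : String) : Int :=
  (PySem.List.pyRange 0 (pvPointsA.length : Int) 1).foldl
    (fun tot y => pvInnerA (PySem.List.pyGetD pvPointsA y []) entered_letter y tot) 0

-- ===== PORT B =====
def pvScrabbleValues : PySem.Dict String Int :=
  PySem.Dict.ofList
    [("a", 1), ("e", 1), ("i", 1), ("o", 1), ("u", 1), ("l", 1), ("n", 1), ("r", 1), ("s", 1), ("t", 1),
     ("d", 2), ("g", 2),
     ("b", 3), ("c", 3), ("m", 3), ("p", 3),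
     ("f", 4), ("h", 4), ("v", 4), ("w", 4), ("y", 4),
     ("k", 5),
     ("j", 8), ("x", 8),
     ("q", 10), ("z", 10)]

def find_letter_value_alt (entered_letter : String) : Int :=
  pvScrabbleValues.getD entered_letter 0

-- ===== PRECONDITION & SPEC =====
def Spec_find_letter_value (entered_letter : String) (out : Int) : Prop := out = find_letter_value_alt entered_letter
instance (entered_letter : String) (out : Int) : Decidable (Spec_find_letter_value entered_letter out) := by unfold Spec_find_letter_value; infer_instance

-- ===== CLAIM (what is proved, stated in full; the proofs are below) =====
def Claim_equal_find_letter_value : Prop := ∀ (entered_letter : String), Dom_find_letter_value entered_letter → Spec_find_letter_value entered_letter (find_letter_value entered_letter)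

-- ===== LEMMAS AND PROOFS =====

-- pvInnerA leaves tot untouched when no row letter equals s
theorem pvInnerA_skip (xs : List String) (s : String) (y tot : Int)
    (h : ∀ x ∈ xs, x ≠ s) : pvInnerA xs s y tot = tot := by
  induction xs with
  | nil => rfl
  | cons x rest ih =>
    simp only [pvInnerA]
    rw [if_neg (by simpa using h x (by simp)), ih (fun z hz => h z (by simp [hz]))]

def pvLetters : List String :=
  ["a", "e", "i", "o", "u", "l", "n", "r", "s", "t", "d", "g", "b", "c", "m", "p",
   "f", "h", "v", "w", "y", "k", "j", "x", "q", "z"]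

-- Both sides reduce, on any string s, to the same lookup over the 26 letters.
theorem find_letter_value_eq_alt (s : String) : find_letter_value s = find_letter_value_alt s := by
  by_cases hmem : s ∈ pvLetters
  · fin_cases hmem <;> decide
  · simp only [pvLetters, List.mem_cons, List.not_mem_nil, or_false, not_or] at hmem
    have hA : find_letter_value s = 0 := by
      have hr : PySem.List.pyRange 0 ((pvPointsA.length : Int)) 1 = [0, 1, 2, 3, 4, 5, 6] := by decide
      simp only [find_letter_value, hr, List.foldl]
      rw [pvInnerA_skip, pvInnerA_skip, pvInnerA_skip, pvInnerA_skip, pvInnerA_skip,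
          pvInnerA_skip, pvInnerA_skip] <;>
        (intro x hx heq; subst heq; revert hx;
         simp only [PySem.List.pyGetD, PySem.List.pyGet?, PySem.List.pyIdx?, pvPointsA];
         norm_num [show (Int.toNat 0) = 0 from rfl, show (Int.toNat 1) = 1 from rfl,
           show (Int.toNat 2) = 2 from rfl, show (Int.toNat 3) = 3 from rfl,
           show (Int.toNat 4) = 4 from rfl, show (Int.toNat 5) = 5 from rfl,
           show (Int.toNat 6) = 6 from rfl]; tauto)
    have hB : find_letter_value_alt s = 0 := by
      have hd : pvScrabbleValues = PySem.Dict.mk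
        [("a", 1), ("e", 1), ("i", 1), ("o", 1), ("u", 1), ("l", 1), ("n", 1), ("r", 1), ("s", 1), ("t", 1),
         ("d", 2), ("g", 2), ("b", 3), ("c", 3), ("m", 3), ("p", 3), ("f", 4), ("h", 4), ("v", 4), ("w", 4),
         ("y", 4), ("k", 5), ("j", 8), ("x", 8), ("q", 10), ("z", 10)] := by decide
      obtain ⟨h1, h2, h3, h4, h5, h6, h7, h8, h9, h10, h11, h12, h13, h14, h15, h16, h17,
        h18, h19, h20, h21, h22, h23, h24, h25, h26⟩ := hmem
      simp [find_letter_value_alt, hd, PySem.Dict.getD, PySem.Dict.get?,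
        Ne.symm h1, Ne.symm h2, Ne.symm h3, Ne.symm h4, Ne.symm h5, Ne.symm h6, Ne.symm h7,
        Ne.symm h8, Ne.symm h9, Ne.symm h10, Ne.symm h11, Ne.symm h12, Ne.symm h13, Ne.symm h14,
        Ne.symm h15, Ne.symm h16, Ne.symm h17, Ne.symm h18, Ne.symm h19, Ne.symm h20, Ne.symm h21,
        Ne.symm h22, Ne.symm h23, Ne.symm h24, Ne.symm h25, Ne.symm h26]
    rw [hA, hB]

-- ===== VERDICT (by name: the statement is the Claim_ definition above) =====
theorem find_letter_value_spec : Claim_equal_find_letter_value := by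
  intro s _
  exact find_letter_value_eq_alt s
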